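-- pv_equiv track=rewrite | github.com/chianglife/findUnusedImages | GetImageNames.py | getUnusedImagePaths
-- ===== SOURCE A (Python) =====
-- def getUnusedImagePaths(unusedImageNames, allPaths):
--     unusedImagePaths = set()
--     for name in unusedImageNames:
--         for path in allPaths:
--             fileName = path.split('/')[-1].split('@')[0]
--             if name == fileName:
--                 unusedImagePaths.add(path)
--     return unusedImagePaths
-- ===== SOURCE B (Python) =====
-- def getUnusedImagePaths(unusedImageNames, allPaths):
--     byName = {}
--     for path in allPaths:
--         byName.setdefault(path.split('/')[-1].split('@')[0], []).append(path)
--     result = set()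
--     for name in unusedImageNames:
--         result.update(byName.get(name, []))
--     return result
-- ===== Notes on version B (the rewrite author's own statement) =====
-- stated objective: faster
-- what changed: B groups all paths by their extracted filename in one pass into a dict, then looks each unused name up once, replacing A's nested names-by-paths scan that re-splits every path for every name.
import Mathlib
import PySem

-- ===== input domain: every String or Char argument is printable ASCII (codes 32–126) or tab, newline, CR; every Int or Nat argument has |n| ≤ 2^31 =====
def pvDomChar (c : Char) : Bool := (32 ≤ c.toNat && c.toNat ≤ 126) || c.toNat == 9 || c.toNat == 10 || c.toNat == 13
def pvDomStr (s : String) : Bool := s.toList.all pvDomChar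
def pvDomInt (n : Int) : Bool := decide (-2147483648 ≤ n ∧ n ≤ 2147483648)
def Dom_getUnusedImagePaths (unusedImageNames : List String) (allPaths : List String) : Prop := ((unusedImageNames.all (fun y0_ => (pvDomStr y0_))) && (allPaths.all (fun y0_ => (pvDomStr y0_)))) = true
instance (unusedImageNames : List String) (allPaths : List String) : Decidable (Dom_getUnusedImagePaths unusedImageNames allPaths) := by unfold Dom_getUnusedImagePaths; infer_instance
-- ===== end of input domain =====

-- B replaces A's nested names-by-paths scan with a one-pass dict grouping paths by filename, then one lookup per name (faster).
-- ===== PORT A =====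
-- shared helper: path.split('/')[-1].split('@')[0] (both Pythons compute this expression verbatim)
def pvFileName (p : String) : String :=
  PySem.List.pyGetD ((PySem.Str.split? (PySem.List.pyGetD ((PySem.Str.split? p "/").getD []) (-1) "") "@").getD []) 0 ""

def getUnusedImagePaths (unusedImageNames : List String) (allPaths : List String) : List String :=
  unusedImageNames.foldl (fun s name =>
    allPaths.foldl (fun s path =>
      if name == pvFileName path then PySem.Set.add s path else s) s) []

-- ===== PORT B =====
def pvIndex (allPaths : List String) : PySem.Dict String (List String) :=
  allPaths.foldl (fun d path => PySem.Dict.modify d (pvFileName path) [] (fun l => l ++ [path])) PySem.Dict.empty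

def getUnusedImagePaths_alt (unusedImageNames : List String) (allPaths : List String) : List String :=
  let byName := pvIndex allPaths
  unusedImageNames.foldl (fun s name => PySem.Set.update s (PySem.Dict.getD byName name [])) []

-- ===== PRECONDITION & SPEC =====
def Spec_getUnusedImagePaths (unusedImageNames : List String) (allPaths : List String) (out : List String) : Prop := out = getUnusedImagePaths_alt unusedImageNames allPaths
instance (unusedImageNames : List String) (allPaths : List String) (out : List String) : Decidable (Spec_getUnusedImagePaths unusedImageNames allPaths out) := by unfold Spec_getUnusedImagePaths; infer_instance

-- ===== CLAIM (what is proved, stated in full; the proofs are below) =====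
def Claim_equal_getUnusedImagePaths : Prop := ∀ (unusedImageNames : List String) (allPaths : List String), Dom_getUnusedImagePaths unusedImageNames allPaths → Spec_getUnusedImagePaths unusedImageNames allPaths (getUnusedImagePaths unusedImageNames allPaths)

-- ===== LEMMAS AND PROOFS =====

-- A's inner loop over paths is s.update(matching paths in order)
theorem pvA_inner (name : String) (ps : List String) (s : PySem.Set String) :
    ps.foldl (fun s path => if name == pvFileName path then PySem.Set.add s path else s) s
      = PySem.Set.update s (ps.filter (fun path => name == pvFileName path)) := by
  induction ps generalizing s with
  | nil => simp [PySem.Set.update_nil]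
  | cons p ps ih =>
    simp only [List.foldl_cons, List.filter_cons]
    by_cases h : (name == pvFileName p) = true
    · rw [if_pos h, ih, if_pos h, PySem.Set.update_cons]
    · rw [if_neg h, ih, if_neg h]

-- the grouping dict maps each name to the matching paths in order
theorem pvIndex_getD (ps : List String) (d : PySem.Dict String (List String)) (k : String) :
    (ps.foldl (fun d path => PySem.Dict.modify d (pvFileName path) [] (fun l => l ++ [path])) d).getD k []
      = d.getD k [] ++ ps.filter (fun path => pvFileName path == k) := by
  induction ps generalizing d with
  | nil => simp
  | cons p ps ih =>
    simp only [List.foldl_cons, List.filter_cons, ih]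
    rw [PySem.Dict.getD_modify]
    by_cases h : k = pvFileName p
    · simp [h]
    · have hb : (pvFileName p == k) = false := beq_eq_false_iff_ne.mpr (Ne.symm h)
      simp [h, hb]

-- ===== VERDICT (by name: the statement is the Claim_ definition above) =====
theorem getUnusedImagePaths_spec : Claim_equal_getUnusedImagePaths := by
  intro names paths _
  show getUnusedImagePaths names paths = getUnusedImagePaths_alt names paths
  unfold getUnusedImagePaths getUnusedImagePaths_alt pvIndex
  refine List.foldl_ext _ _ _ fun s name _ => ?_
  rw [pvA_inner, pvIndex_getD, PySem.Dict.getD_empty, List.nil_append]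
  exact congrArg _ (List.filter_congr fun p _ => by rw [Bool.eq_iff_iff]; simp only [beq_iff_eq]; exact eq_comm)
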